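-- pv_equiv track=rewrite | github.com/GJzh/Leetcode | python/420. Strong Password Checker.py | threeCharacters
-- ===== SOURCE A (Python) =====
-- def threeCharacters(s):
--     cnt = 0
--     status = [False] * 3
--     for c in s:
--         if c.isdigit():
--             status[0] = True
--         if c.isupper():
--             status[1] = True
--         if c.islower():
--             status[2] = True
--         if status[0] and status[1] and status[2]:
--             break
--     for i in status:
--         if i: cnt += 1
--     return 3 - cnt
-- ===== SOURCE B (Python) =====
-- def threeCharacters(s):
--     return 3 - sum(any(f(c) for c in s) for f in (str.isdigit, str.isupper, str.islower))
-- ===== Notes on version B (the rewrite author's own statement) =====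
-- stated objective: idiomatic
-- what changed: Replaces the single character loop updating a three-flag list with early break by three independent any() existence scans, one per category predicate, summed over the predicates.
import Mathlib
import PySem

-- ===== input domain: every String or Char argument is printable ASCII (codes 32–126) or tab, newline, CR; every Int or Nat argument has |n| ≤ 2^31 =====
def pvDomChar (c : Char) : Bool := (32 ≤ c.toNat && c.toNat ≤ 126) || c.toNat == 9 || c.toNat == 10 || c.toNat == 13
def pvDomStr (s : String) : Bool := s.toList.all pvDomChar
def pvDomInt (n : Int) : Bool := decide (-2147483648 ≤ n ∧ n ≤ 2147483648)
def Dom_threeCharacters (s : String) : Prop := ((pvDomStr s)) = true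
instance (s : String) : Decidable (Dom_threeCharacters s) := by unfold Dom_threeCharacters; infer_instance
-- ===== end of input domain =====

-- B replaces A's single flag-updating loop with early break by three independent any() existence scans (idiomatic; same cost).

-- ===== PORT A =====
-- the for-loop over s with the three-flag status list and the early break
def threeCharLoopA : List Char → Bool × Bool × Bool → Bool × Bool × Bool
  | [], st => st
  | c :: rest, (d, u, l) =>
    let d := if PySem.Chars.isdigit c then true else d
    let u := if PySem.Chars.isupper c then true else u
    let l := if PySem.Chars.islower c then true else l
    if d && u && l then (d, u, l) else threeCharLoopA rest (d, u, l)

def threeCharacters (s : String) : Int :=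
  let st := threeCharLoopA s.toList (false, false, false)
  let cnt : Int := (if st.1 then 1 else 0) + (if st.2.1 then 1 else 0) + (if st.2.2 then 1 else 0)
  3 - cnt

-- ===== PORT B =====
def threeCharacters_alt (s : String) : Int :=
  3 - ([PySem.Chars.isdigit, PySem.Chars.isupper, PySem.Chars.islower].map
        (fun f => if s.toList.any f then (1 : Int) else 0)).sum

-- ===== PRECONDITION & SPEC =====
def Spec_threeCharacters (s : String) (out : Int) : Prop := out = threeCharacters_alt s
instance (s : String) (out : Int) : Decidable (Spec_threeCharacters s out) := by unfold Spec_threeCharacters; infer_instance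

-- ===== CLAIM (what is proved, stated in full; the proofs are below) =====
def Claim_equal_threeCharacters : Prop := ∀ (s : String), Dom_threeCharacters s → Spec_threeCharacters s (threeCharacters s)

-- ===== LEMMAS AND PROOFS =====
theorem threeCharLoopA_eq (cs : List Char) (d u l : Bool) :
    threeCharLoopA cs (d, u, l) =
      (d || cs.any PySem.Chars.isdigit, u || cs.any PySem.Chars.isupper, l || cs.any PySem.Chars.islower) := by
  induction cs generalizing d u l with
  | nil => simp [threeCharLoopA]
  | cons c rest ih =>
    simp only [threeCharLoopA, List.any_cons]
    cases hd : PySem.Chars.isdigit c <;> cases hu : PySem.Chars.isupper c <;>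
      cases hl : PySem.Chars.islower c <;> cases d <;> cases u <;> cases l <;>
        simp [ih]

-- ===== VERDICT (by name: the statement is the Claim_ definition above) =====
theorem threeCharacters_spec : Claim_equal_threeCharacters := by
  intro s _
  unfold Spec_threeCharacters threeCharacters threeCharacters_alt
  rw [threeCharLoopA_eq]
  cases h1 : s.toList.any PySem.Chars.isdigit <;>
    cases h2 : s.toList.any PySem.Chars.isupper <;>
      cases h3 : s.toList.any PySem.Chars.islower <;>
        simp only [h1, h2, h3, List.map_cons, List.map_nil, List.sum_cons, List.sum_nil,
          if_true, if_false, Bool.false_eq_true] <;> norm_num
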